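-- pv_equiv track=rewrite | github.com/b-mitch/AOC_23 | Day20/day_20.py | build_conj_map
-- ===== SOURCE A (Python) =====
-- def build_conj_map(graph, modules):
--     conjunctions_map = dict()
--     for key, values in graph.items():
--         for value in values:
--             if value in modules and modules[value][0] == '&':
--                 if value not in conjunctions_map:
--                     conjunctions_map[value] = [key]
--                 else:
--                     conjunctions_map[value].append(key)
--     return conjunctions_map
-- ===== SOURCE B (Python) =====
-- def build_conj_map(graph, modules):
--     edges = [(v, k) for k, vals in graph.items() for v in vals]
--     targets = []
--     for v, _ in edges:
--         if v not in targets and v in modules and modules[v][0] == '&':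
--             targets.append(v)
--     return {v: [k for t, k in edges if t == v] for v in targets}
-- ===== Notes on version B (the rewrite author's own statement) =====
-- stated objective: alternative
-- what changed: B replaces A's single-pass dict accumulation with three staged passes: materialise the (target, source) edge list, collect the distinct conjunction targets in first-occurrence order, then gather each target's sources by a separate scan of the edges per target.
import Mathlib
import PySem

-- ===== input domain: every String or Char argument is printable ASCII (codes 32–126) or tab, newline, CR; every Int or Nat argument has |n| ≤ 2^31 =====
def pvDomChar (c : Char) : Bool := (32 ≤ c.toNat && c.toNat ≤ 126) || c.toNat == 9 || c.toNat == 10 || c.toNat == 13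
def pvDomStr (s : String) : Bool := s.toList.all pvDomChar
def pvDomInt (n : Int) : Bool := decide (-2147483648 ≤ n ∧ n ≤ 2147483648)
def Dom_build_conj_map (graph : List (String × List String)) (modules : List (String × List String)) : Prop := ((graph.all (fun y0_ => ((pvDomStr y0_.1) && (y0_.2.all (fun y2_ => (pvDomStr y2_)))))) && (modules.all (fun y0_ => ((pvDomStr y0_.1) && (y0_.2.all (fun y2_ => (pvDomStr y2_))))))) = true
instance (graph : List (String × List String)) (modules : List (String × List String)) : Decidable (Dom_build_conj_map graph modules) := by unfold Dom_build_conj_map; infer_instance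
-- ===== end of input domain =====

-- B materialises the (target, source) edge list, then builds the distinct conjunction-target list in
-- first-occurrence order, then gathers each target's sources by a per-target scan of the edges
-- (O(T*E) gather instead of A's single-pass dict accumulation); objective: alternative.


-- ===== PORT A =====
-- `value in modules and modules[value][0] == '&'` (identical text in both Pythons; pyGet? m 0 = none is
-- where Python raises IndexError — excluded by Pre_ below)
def pvIsConj (modules : List (String × List String)) (value : String) : Bool :=
  match (PySem.Dict.mk modules).get? value with
  | some m => PySem.List.pyGet? m 0 == some "&"
  | none => false

def build_conj_map (graph : List (String × List String)) (modules : List (String × List String)) : List (String × List String) :=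
  (graph.foldl (fun (cm : PySem.Dict String (List String)) kv =>
      kv.2.foldl (fun cm value =>
        if pvIsConj modules value then
          match cm.get? value with
          | none => cm.insert value [kv.1]                 -- conjunctions_map[value] = [key]
          | some lst => cm.insert value (lst ++ [kv.1])    -- conjunctions_map[value].append(key)
        else cm) cm)
    PySem.Dict.empty).items

-- ===== PORT B =====
def build_conj_map_alt (graph : List (String × List String)) (modules : List (String × List String)) : List (String × List String) :=
  -- edges = [(v, k) for k, vals in graph.items() for v in vals]
  let edges := graph.flatMap (fun kv => kv.2.map (fun v => (v, kv.1)))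
  -- targets: first-occurrence-ordered distinct conjunction targets
  let targets := edges.foldl (fun (ts : List String) e =>
      if !ts.contains e.1 && pvIsConj modules e.1 then ts ++ [e.1] else ts) []
  -- {v: [k for t, k in edges if t == v] for v in targets}
  targets.map (fun v => (v, (edges.filter (fun e => e.1 == v)).map (fun e => e.2)))

-- ===== PRECONDITION & SPEC =====
-- Pre_ excludes exactly the inputs where the Python raises IndexError: some referenced value names a
-- module whose (first-match) entry is the empty list, so modules[value][0] fails (in A and in B alike).
def Pre_build_conj_map (graph : List (String × List String)) (modules : List (String × List String)) : Prop :=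
  ∀ p ∈ graph, ∀ v ∈ p.2, (PySem.Dict.mk modules).get? v ≠ some []
instance (graph : List (String × List String)) (modules : List (String × List String)) : Decidable (Pre_build_conj_map graph modules) := by unfold Pre_build_conj_map; infer_instance
def pvWitness_build_conj_map : (List (String × List String)) × (List (String × List String)) :=
  ([("a", ["b", "c"]), ("b", ["c"])], [("b", ["%"]), ("c", ["&", "x"])])

def Spec_build_conj_map (graph : List (String × List String)) (modules : List (String × List String)) (out : List (String × List String)) : Prop := out = build_conj_map_alt graph modules
instance (graph : List (String × List String)) (modules : List (String × List String)) (out : List (String × List String)) : Decidable (Spec_build_conj_map graph modules out) := by unfold Spec_build_conj_map; infer_instance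

-- ===== CLAIM (what is proved, stated in full; the proofs are below) =====
def Claim_equal_build_conj_map : Prop := ∀ (graph : List (String × List String)) (modules : List (String × List String)), Dom_build_conj_map graph modules → Pre_build_conj_map graph modules → Spec_build_conj_map graph modules (build_conj_map graph modules)

-- ===== LEMMAS AND PROOFS =====

-- A's per-edge update, written over a (target, source) pair
def pvStepA (cond : String → Bool) (cm : PySem.Dict String (List String)) (e : String × String) :
    PySem.Dict String (List String) :=
  if cond e.1 then
    match cm.get? e.1 with
    | none => cm.insert e.1 [e.2]
    | some lst => cm.insert e.1 (lst ++ [e.2])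
  else cm

-- B's target-collection step
def pvStepT (cond : String → Bool) (ts : List String) (e : String × String) : List String :=
  if !ts.contains e.1 && cond e.1 then ts ++ [e.1] else ts

def pvT (cond : String → Bool) (pre : List (String × String)) : List String :=
  pre.foldl (pvStepT cond) []

def pvS (pre : List (String × String)) (v : String) : List String :=
  (pre.filter (fun e => e.1 == v)).map (fun e => e.2)

-- A's nested loop over graph is the flat loop over the edge list
theorem pvA_flat (cond : String → Bool) (graph : List (String × List String)) :
    ∀ d : PySem.Dict String (List String),
      graph.foldl (fun cm kv =>
        kv.2.foldl (fun cm value =>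
          if cond value then
            match cm.get? value with
            | none => cm.insert value [kv.1]
            | some lst => cm.insert value (lst ++ [kv.1])
          else cm) cm) d
      = (graph.flatMap (fun kv => kv.2.map (fun v => (v, kv.1)))).foldl (pvStepA cond) d := by
  induction graph with
  | nil => intro d; rfl
  | cons kv graph ih =>
    intro d
    simp only [List.foldl_cons, List.flatMap_cons, List.foldl_append, List.foldl_map, ih]
    rfl

-- membership facts for the target fold
theorem pvMem_tfold_mono (cond : String → Bool) (pre : List (String × String)) :
    ∀ (acc : List String) (v : String), v ∈ acc → v ∈ pre.foldl (pvStepT cond) acc := by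
  induction pre with
  | nil => intro acc v h; simpa using h
  | cons e pre ih =>
    intro acc v h
    apply ih
    unfold pvStepT
    split_ifs <;> simp [h]

theorem pvMem_tfold_of_occ (cond : String → Bool) (pre : List (String × String)) :
    ∀ (acc : List String) (v : String), cond v = true → (∃ e ∈ pre, e.1 = v) →
      v ∈ pre.foldl (pvStepT cond) acc := by
  induction pre with
  | nil => intro acc v _ h; simp at h
  | cons e pre ih =>
    intro acc v hc h
    rcases h with ⟨e', he', hv⟩
    rcases List.mem_cons.mp he' with h' | h'
    · subst h'
      subst hv
      simp only [List.foldl_cons]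
      apply pvMem_tfold_mono
      unfold pvStepT
      by_cases hm : e'.1 ∈ acc
      · simp [hm]
      · simp [hm, hc]
    · exact ih _ v hc ⟨e', h', hv⟩

theorem pvCond_of_mem_tfold (cond : String → Bool) (pre : List (String × String)) :
    ∀ (acc : List String), (∀ v ∈ acc, cond v = true) →
      ∀ v ∈ pre.foldl (pvStepT cond) acc, cond v = true := by
  induction pre with
  | nil => intro acc hacc v hv; exact hacc v hv
  | cons e pre ih =>
    intro acc hacc v hv
    refine ih _ ?_ v hv
    intro w hw
    unfold pvStepT at hw
    by_cases hb : (!acc.contains e.1 && cond e.1) = true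
    · rw [if_pos hb] at hw
      rcases List.mem_append.mp hw with h | h
      · exact hacc w h
      · simp at h
        subst h
        exact (Bool.and_eq_true _ _).mp hb |>.2
    · rw [if_neg hb] at hw
      exact hacc w hw

theorem pvCond_of_mem_T (cond : String → Bool) (pre : List (String × String)) (v : String)
    (h : v ∈ pvT cond pre) : cond v = true :=
  pvCond_of_mem_tfold cond pre [] (by simp) v h

theorem pvNot_occ_of_not_mem_T (cond : String → Bool) (pre : List (String × String)) (v : String)
    (hc : cond v = true) (h : v ∉ pvT cond pre) : ∀ e ∈ pre, e.1 ≠ v := by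
  intro e he hv
  exact h (pvMem_tfold_of_occ cond pre [] v hc ⟨e, he, hv⟩)

-- first match in a keyed map
theorem pvFind_map_key (g : String → List String) (v : String) (l : List String) :
    (l.map (fun u => (u, g u))).find? (fun p => p.1 == v) = if v ∈ l then some (v, g v) else none := by
  induction l with
  | nil => rfl
  | cons u l ih =>
    by_cases hu : u = v
    · subst hu; simp
    · have : ((u, g u).1 == v) = false := by simp [hu]
      simp only [List.map_cons, List.find?_cons, this, ih]
      simp [List.mem_cons, Ne.symm hu]

-- extending the seen-edge list by one
theorem pvT_append (cond : String → Bool) (pre : List (String × String)) (e : String × String) :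
    pvT cond (pre ++ [e]) = pvStepT cond (pvT cond pre) e := by
  unfold pvT; rw [List.foldl_append]; rfl

theorem pvS_append (pre : List (String × String)) (e : String × String) (v : String) :
    pvS (pre ++ [e]) v = pvS pre v ++ (if e.1 == v then [e.2] else []) := by
  unfold pvS
  rw [List.filter_append]
  by_cases h : (e.1 == v) = true <;> simp [List.filter, h]

-- the invariant: A's dict prints as B's targets-and-sources table
theorem pvMain (cond : String → Bool) :
    ∀ (rest seen : List (String × String)) (d : PySem.Dict String (List String)),
      d.items = (pvT cond seen).map (fun v => (v, pvS seen v)) →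
      (rest.foldl (pvStepA cond) d).items
        = (pvT cond (seen ++ rest)).map (fun v => (v, pvS (seen ++ rest) v)) := by
  intro rest
  induction rest with
  | nil => intro seen d h; simpa using h
  | cons e rest ih =>
    intro seen d h
    have key : (pvStepA cond d e).items
        = (pvT cond (seen ++ [e])).map (fun v => (v, pvS (seen ++ [e]) v)) := by
      have hget : d.get? e.1
          = if e.1 ∈ pvT cond seen then some (pvS seen e.1) else none := by
        simp only [PySem.Dict.get?, h]
        rw [pvFind_map_key (pvS seen) e.1 (pvT cond seen)]
        split_ifs <;> rfl
      by_cases hc : cond e.1 = true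
      · by_cases hm : e.1 ∈ pvT cond seen
        · -- existing key: in-place replacement
          have hsome : d.get? e.1 = some (pvS seen e.1) := by rw [hget]; simp [hm]
          have hcont : d.contains e.1 = true := by
            rw [PySem.Dict.contains_eq_isSome_get?, hsome]; rfl
          have hT : pvT cond (seen ++ [e]) = pvT cond seen := by
            rw [pvT_append]; unfold pvStepT; simp [hm]
          simp only [pvStepA, hc, if_true, hsome]
          rw [PySem.Dict.items_insert_of_contains d _ hcont, h, hT, List.map_map]
          apply List.map_congr_left
          intro v hv
          by_cases hev : v = e.1
          · subst hev
            simp [pvS_append]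
          · have hb : (v == e.1) = false := by simp [hev]
            have hb' : (e.1 == v) = false := by
              simp only [beq_eq_false_iff_ne, ne_eq]
              exact fun h' => hev h'.symm
            simp [Function.comp, hb, pvS_append, hb']
        · -- fresh key: appended at the end with singleton source list
          have hnone : d.get? e.1 = none := by rw [hget]; simp [hm]
          have hcont : d.contains e.1 = false := by
            rw [PySem.Dict.contains_eq_isSome_get?, hnone]; rfl
          have hT : pvT cond (seen ++ [e]) = pvT cond seen ++ [e.1] := by
            rw [pvT_append]; unfold pvStepT; simp [hm, hc]
          have hSnil : pvS seen e.1 = [] := by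
            unfold pvS
            have hno : ∀ e' ∈ seen, ¬ (e'.1 == e.1) = true := by
              intro e' he' hb
              exact pvNot_occ_of_not_mem_T cond seen e.1 hc hm e' he' (by simpa using hb)
            simp [List.filter_eq_nil_iff.mpr hno]
          simp only [pvStepA, hc, if_true, hnone]
          rw [PySem.Dict.items_insert_of_not_contains d _ hcont, h, hT]
          rw [List.map_append]
          congr 1
          · apply List.map_congr_left
            intro v hv
            have hev : (e.1 == v) = false := by
              simp only [beq_eq_false_iff_ne, ne_eq]
              exact fun h' => hm (h' ▸ hv)
            simp [pvS_append, hev]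
          · simp [pvS_append, hSnil]
      · -- non-conjunction target: both sides unchanged
        simp only [Bool.not_eq_true] at hc
        have hT : pvT cond (seen ++ [e]) = pvT cond seen := by
          rw [pvT_append]; unfold pvStepT; simp [hc]
        simp only [pvStepA, hc, Bool.false_eq_true, if_false]
        rw [h, hT]
        apply List.map_congr_left
        intro v hv
        have hcv : cond v = true := pvCond_of_mem_T cond seen v hv
        have hev : (e.1 == v) = false := by
          simp only [beq_eq_false_iff_ne, ne_eq]
          intro h'
          rw [h', hcv] at hc
          exact Bool.true_eq_false.mp hc
        simp [pvS_append, hev]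
    have := ih (seen ++ [e]) (pvStepA cond d e) key
    simpa [List.foldl_cons, List.append_assoc] using this

-- ===== VERDICT (by name: the statement is the Claim_ definition above) =====
theorem build_conj_map_spec : Claim_equal_build_conj_map := by
  intro graph modules _ _
  unfold Spec_build_conj_map build_conj_map build_conj_map_alt
  rw [pvA_flat (pvIsConj modules) graph PySem.Dict.empty]
  exact pvMain (pvIsConj modules) _ [] PySem.Dict.empty rfl
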